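-- pv_equiv track=rewrite | github.com/manu1307/coding_test_python | solution/04.py | solution
-- ===== SOURCE A (Python) =====
-- def solution(answers):
--     scores = [0, 0, 0]
--     questions = len(answers)
--     answer1 = [1, 2, 3, 4, 5] * (questions // 5) + [1, 2, 3, 4, 5][:questions % 5]
--     answer2 = [2, 1, 2, 3, 2, 4, 2, 5] * (questions // 8) + [2, 1, 2, 3, 2, 4, 2, 5][:questions % 8]
--     answer3 = [3, 3, 1, 1, 2, 2, 4, 4, 5, 5] * (questions // 10) + [3, 3, 1, 1, 2, 2, 4, 4, 5, 5][:questions % 10]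
--
--     for i, a in enumerate(answers):
--         if a == answer1[i]:
--             scores[0] += 1
--         if a == answer2[i]:
--             scores[1] += 1
--         if a == answer3[i]:
--             scores[2] += 1
--
--     highest_scorer = []
--     max_score = max(scores)
--     for i, score in enumerate(scores):
--         if score == max_score:
--             highest_scorer.append(i + 1)
--     return highest_scorer
-- ===== SOURCE B (Python) =====
-- def solution(answers):
--     # 40 = lcm(5, 8, 10): every base pattern, extended to period 40, is one row here.
--     tables = [[1, 2, 3, 4, 5] * 8,
--               [2, 1, 2, 3, 2, 4, 2, 5] * 5,
--               [3, 3, 1, 1, 2, 2, 4, 4, 5, 5] * 4]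
--     # One pass: histogram of (position mod 40, given answer).
--     cnt = {}
--     for i, a in enumerate(answers):
--         k = (i % 40, a)
--         cnt[k] = cnt.get(k, 0) + 1
--     # Each score is a 40-term lookup sum against the histogram.
--     scores = [sum(cnt.get((r, t[r]), 0) for r in range(40)) for t in tables]
--     best = max(scores)
--     return [i + 1 for i, s in enumerate(scores) if s == best]
-- ===== Notes on version B (the rewrite author's own statement) =====
-- stated objective: alternative
-- what changed: B replaces A's element-wise comparison of answers against three materialized length-n pattern lists by a histogram built in one pass over (position mod 40, answer) pairs (40 = lcm of the pattern periods); each student's score is then a 40-term lookup sum into that table, so no pattern is ever compared against the answers element by element.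
import Mathlib
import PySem

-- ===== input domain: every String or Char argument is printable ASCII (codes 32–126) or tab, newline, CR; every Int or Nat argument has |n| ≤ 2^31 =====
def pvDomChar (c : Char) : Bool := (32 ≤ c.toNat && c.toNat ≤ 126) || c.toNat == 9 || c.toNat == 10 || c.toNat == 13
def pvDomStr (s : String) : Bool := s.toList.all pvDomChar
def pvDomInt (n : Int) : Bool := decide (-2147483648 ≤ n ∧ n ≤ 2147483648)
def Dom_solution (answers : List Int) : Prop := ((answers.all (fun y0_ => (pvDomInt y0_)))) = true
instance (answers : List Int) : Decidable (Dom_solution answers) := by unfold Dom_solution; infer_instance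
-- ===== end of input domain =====

-- B scores via a residue-class histogram (counts of (i mod 40, answer) pairs) and 40-term
-- lookup sums, instead of A's element-wise comparison against three materialized length-n
-- pattern lists (objective: alternative).


-- ===== PORT A =====
def solution (answers : List Int) : List Int :=
  let questions : Int := (answers.length : Int)
  let answer1 := PySem.List.pyRepeat [1, 2, 3, 4, 5] (PySem.Int.floordiv questions 5) ++
    PySem.List.slice [1, 2, 3, 4, 5] none (some (PySem.Int.mod questions 5))
  let answer2 := PySem.List.pyRepeat [2, 1, 2, 3, 2, 4, 2, 5] (PySem.Int.floordiv questions 8) ++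
    PySem.List.slice [2, 1, 2, 3, 2, 4, 2, 5] none (some (PySem.Int.mod questions 8))
  let answer3 := PySem.List.pyRepeat [3, 3, 1, 1, 2, 2, 4, 4, 5, 5] (PySem.Int.floordiv questions 10) ++
    PySem.List.slice [3, 3, 1, 1, 2, 2, 4, 4, 5, 5] none (some (PySem.Int.mod questions 10))
  -- scores = [0,0,0] held as a triple; each 'if a == answerK[i]' compares against the indexed element
  let scores := (PySem.List.enumerate answers 0).foldl
    (fun (s : Int × Int × Int) p =>
      (if PySem.List.pyGet? answer1 p.1 = some p.2 then s.1 + 1 else s.1,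
       if PySem.List.pyGet? answer2 p.1 = some p.2 then s.2.1 + 1 else s.2.1,
       if PySem.List.pyGet? answer3 p.1 = some p.2 then s.2.2 + 1 else s.2.2)) (0, 0, 0)
  let max_score := (PySem.List.max? [scores.1, scores.2.1, scores.2.2] (fun y => y)).getD 0
  (PySem.List.enumerate [scores.1, scores.2.1, scores.2.2] 0).foldl
    (fun acc p => if p.2 = max_score then acc ++ [p.1 + 1] else acc) []

-- ===== PORT B =====
def solution_alt (answers : List Int) : List Int :=
  let tables : List (List Int) :=
    [PySem.List.pyRepeat [1, 2, 3, 4, 5] 8,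
     PySem.List.pyRepeat [2, 1, 2, 3, 2, 4, 2, 5] 5,
     PySem.List.pyRepeat [3, 3, 1, 1, 2, 2, 4, 4, 5, 5] 4]
  -- one pass: cnt[(i % 40, a)] = cnt.get((i % 40, a), 0) + 1
  let cnt : PySem.Dict (Int × Int) Int := (PySem.List.enumerate answers 0).foldl
    (fun d p =>
      d.insert (PySem.Int.mod p.1 40, p.2) (d.getD (PySem.Int.mod p.1 40, p.2) 0 + 1))
    PySem.Dict.empty
  -- each score is a 40-term lookup sum into the histogram
  let scores := tables.map (fun t =>
    ((PySem.List.pyRange 0 40 1).map (fun r => cnt.getD (r, PySem.List.pyGetD t r 0) 0)).sum)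
  let best := (PySem.List.max? scores (fun y => y)).getD 0
  (PySem.List.enumerate scores 0).foldl
    (fun acc p => if p.2 = best then acc ++ [p.1 + 1] else acc) []

-- ===== PRECONDITION & SPEC =====
def Spec_solution (answers : List Int) (out : List Int) : Prop := out = solution_alt answers
instance (answers : List Int) (out : List Int) : Decidable (Spec_solution answers out) := by unfold Spec_solution; infer_instance

-- ===== CLAIM =====
def Claim_equal_solution : Prop := ∀ (answers : List Int), Dom_solution answers → Spec_solution answers (solution answers)

-- ===== LEMMAS AND PROOFS =====

-- A's full-length pattern list, indexed in range, is the base pattern read cyclically.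
lemma repGet (base : List Int) (k r n : Nat) (hr : r ≤ base.length)
    (hn : n < k * base.length + r) :
    ((List.replicate k base).flatten ++ base.take r)[n]? = base[n % base.length]? := by
  induction k generalizing n with
  | zero =>
    have hnr : n < r := by omega
    have hnl : n < base.length := lt_of_lt_of_le hnr hr
    simp [hnr, Nat.mod_eq_of_lt hnl]
  | succ k ih =>
    rw [Nat.succ_mul] at hn
    rw [List.replicate_succ, List.flatten_cons, List.append_assoc]
    by_cases h : n < base.length
    · rw [List.getElem?_append_left h, Nat.mod_eq_of_lt h]
    · push_cast at h
      rw [List.getElem?_append_right (by omega), Nat.mod_eq_sub_mod (by omega)]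
      exact ih (n - base.length) (by omega)

-- one interleaved counting pass over a triple = three independent counting passes
lemma foldl_triple (l : List (Int × Int)) (c1 c2 c3 : (Int × Int) → Prop)
    [DecidablePred c1] [DecidablePred c2] [DecidablePred c3] (s1 s2 s3 : Int) :
    l.foldl (fun (s : Int × Int × Int) p =>
        (if c1 p then s.1 + 1 else s.1,
         if c2 p then s.2.1 + 1 else s.2.1,
         if c3 p then s.2.2 + 1 else s.2.2)) (s1, s2, s3)
    = (l.foldl (fun s p => if c1 p then s + 1 else s) s1,
       l.foldl (fun s p => if c2 p then s + 1 else s) s2,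
       l.foldl (fun s p => if c3 p then s + 1 else s) s3) := by
  induction l generalizing s1 s2 s3 with
  | nil => rfl
  | cons x t ih => simpa only [List.foldl_cons] using ih _ _ _

-- a counting fold is a countP
lemma foldl_count {α : Type} (P : α → Prop) [DecidablePred P] (l : List α) (a : Int) :
    l.foldl (fun s x => if P x then s + 1 else s) a = a + (l.countP (fun x => decide (P x)) : Int) := by
  induction l generalizing a with
  | nil => simp
  | cons x t ih =>
    rw [List.foldl_cons, ih, List.countP_cons]
    by_cases h : P x
    · simp [h]
      ring
    · simp [h]

lemma sum_map_add {α : Type} (l : List α) (A B : α → Int) :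
    (l.map (fun k => A k + B k)).sum = (l.map A).sum + (l.map B).sum := by
  induction l with
  | nil => simp
  | cons x t ih => simp [ih]; ring

lemma sum_ite_zero (n k0 : Nat) (c : Int) (h : n ≤ k0) :
    ((List.range n).map (fun k => if k = k0 then c else 0)).sum = 0 := by
  apply List.sum_eq_zero
  intro x hx
  obtain ⟨k, hk, rfl⟩ := List.mem_map.mp hx
  have : k < n := List.mem_range.mp hk
  simp [show k ≠ k0 by omega]

lemma sum_ite_single (n k0 : Nat) (c : Int) (h : k0 < n) :
    ((List.range n).map (fun k => if k = k0 then c else 0)).sum = c := by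
  induction n with
  | zero => omega
  | succ n ih =>
    rw [List.range_succ, List.map_append, List.sum_append]
    by_cases hk : k0 < n
    · rw [ih hk]
      simp [show n ≠ k0 by omega]
    · have hke : k0 = n := by omega
      rw [sum_ite_zero n k0 c (by omega)]
      simp [hke]

-- summing the histogram over the 40 residue classes = one count over the pairs
lemma sum_classes (l : List (Int × Int)) (f : Int → Int) (h : ∀ p ∈ l, 0 ≤ p.1) :
    ((List.range 40).map (fun k =>
        ((l.countP (fun p => (PySem.Int.mod p.1 40, p.2) == (((k : Nat) : Int), f ((k : Nat) : Int)))) : Int))).sum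
    = ((l.countP (fun p => decide (p.2 = f (PySem.Int.mod p.1 40)))) : Int) := by
  induction l with
  | nil => simp
  | cons p t ih =>
    have hp : 0 ≤ p.1 := h p (List.mem_cons_self ..)
    have ht : ∀ q ∈ t, 0 ≤ q.1 := fun q hq => h q (List.mem_cons_of_mem _ hq)
    have hmod : PySem.Int.mod p.1 40 = ((p.1.toNat % 40 : Nat) : Int) := by
      rw [show p.1 = ((p.1.toNat : Nat) : Int) from (Int.toNat_of_nonneg hp).symm,
        show (40 : Int) = ((40 : Nat) : Int) from rfl, PySem.Int.mod_natCast]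
      simp
    have hlt : p.1.toNat % 40 < 40 := Nat.mod_lt _ (by omega)
    simp only [List.countP_cons]
    push_cast
    rw [sum_map_add, ih ht]
    congr 1
    have hcond : ∀ k : Nat,
        (((PySem.Int.mod p.1 40, p.2) == ((k : Int), f (k : Int))) = true)
        ↔ (k = p.1.toNat % 40 ∧ p.2 = f (PySem.Int.mod p.1 40)) := by
      intro k
      constructor
      · intro hk
        have hpair := Prod.ext_iff.mp (eq_of_beq hk)
        have h1 : PySem.Int.mod p.1 40 = (k : Int) := hpair.1
        have hkk : k = p.1.toNat % 40 := by
          rw [hmod] at h1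
          omega
        exact ⟨hkk, by rw [h1]; exact hpair.2⟩
      · rintro ⟨hkk, h2⟩
        have h1 : PySem.Int.mod p.1 40 = (k : Int) := by rw [hmod, hkk]
        exact beq_iff_eq.mpr (Prod.ext h1 (by rw [← h1]; exact h2))
    have key : ∀ k ∈ List.range 40,
        (if ((PySem.Int.mod p.1 40, p.2) == ((k : Int), f (k : Int))) = true then (1 : Int) else 0)
        = if k = p.1.toNat % 40 then (if p.2 = f (PySem.Int.mod p.1 40) then (1 : Int) else 0) else 0 := by
      intro k _
      by_cases hb : ((PySem.Int.mod p.1 40, p.2) == ((k : Int), f (k : Int))) = true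
      · obtain ⟨hk1, hk2⟩ := (hcond k).mp hb
        rw [if_pos hb, if_pos hk1, if_pos hk2]
      · rw [if_neg hb]
        by_cases hk1 : k = p.1.toNat % 40
        · have hk2 : ¬ p.2 = f (PySem.Int.mod p.1 40) := fun hc => hb ((hcond k).mpr ⟨hk1, hc⟩)
          rw [if_pos hk1, if_neg hk2]
        · rw [if_neg hk1]
    calc (List.map (fun k : Nat => if ((PySem.Int.mod p.1 40, p.2) == ((k : Int), f (k : Int))) = true then (1 : Int) else 0) (List.range 40)).sum
        = (List.map (fun k : Nat => if k = p.1.toNat % 40 then (if p.2 = f (PySem.Int.mod p.1 40) then (1 : Int) else 0) else 0) (List.range 40)).sum :=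
          congrArg List.sum (List.map_congr_left key)
      _ = (if p.2 = f (PySem.Int.mod p.1 40) then (1 : Int) else 0) := sum_ite_single 40 _ _ hlt
      _ = (if decide (p.2 = f (PySem.Int.mod p.1 40)) = true then (1 : Int) else 0) := by
          by_cases hd : p.2 = f (PySem.Int.mod p.1 40)
          · rw [if_pos hd, if_pos (by simpa using hd)]
          · rw [if_neg hd, if_neg (by simpa using hd)]

-- per-pattern bridge: A's counting fold against the materialized full-length list
-- = B's 40-term lookup sum into the histogram
lemma pattern_score (base answers t : List Int) (hL : 0 < base.length) (hdvd : base.length ∣ 40)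
    (ht : t = (List.replicate (40 / base.length) base).flatten) :
    (PySem.List.enumerate answers 0).foldl
      (fun (s : Int) p => if PySem.List.pyGet?
          (PySem.List.pyRepeat base (PySem.Int.floordiv (answers.length : Int) (base.length : Int)) ++
           PySem.List.slice base none (some (PySem.Int.mod (answers.length : Int) (base.length : Int)))) p.1
          = some p.2 then s + 1 else s) 0
    = ((PySem.List.pyRange 0 40 1).map (fun r =>
        ((PySem.List.enumerate answers 0).foldl
            (fun d p =>
              d.insert (PySem.Int.mod p.1 40, p.2) (d.getD (PySem.Int.mod p.1 40, p.2) 0 + 1))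
            PySem.Dict.empty).getD (r, PySem.List.pyGetD t r 0) 0)).sum := by
  have hlen_t : t.length = 40 := by
    rw [ht, List.length_flatten]
    simp [List.map_replicate, Nat.div_mul_cancel hdvd]
  have hcnt : (PySem.List.enumerate answers 0).foldl
      (fun d p =>
        d.insert (PySem.Int.mod p.1 40, p.2) (d.getD (PySem.Int.mod p.1 40, p.2) 0 + 1))
      PySem.Dict.empty
      = PySem.Dict.counter ((PySem.List.enumerate answers 0).map (fun p => (PySem.Int.mod p.1 40, p.2))) := by
    rw [← PySem.Dict.foldl_insert_getD_add_one_eq_counter, List.foldl_map]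
  -- LHS: replace the in-range indexing of the materialized list by t-lookup at the residue
  have hrep : PySem.List.pyRepeat base (PySem.Int.floordiv (answers.length : Int) (base.length : Int)) ++
      PySem.List.slice base none (some (PySem.Int.mod (answers.length : Int) (base.length : Int)))
      = (List.replicate (answers.length / base.length) base).flatten ++ base.take (answers.length % base.length) := by
    rw [PySem.Int.floordiv_natCast, PySem.Int.mod_natCast, PySem.List.slice_to_natCast]
    simp only [PySem.List.pyRepeat, Int.toNat_natCast]
  have htidx : ∀ n : Nat, n % base.length < base.length → t[n % 40]? = base[n % base.length]? := by
    intro n _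
    have h40 : n % 40 < (40 / base.length) * base.length + 0 := by
      rw [Nat.add_zero, Nat.div_mul_cancel hdvd]
      exact Nat.mod_lt _ (by omega)
    have := repGet base (40 / base.length) 0 (n % 40) (Nat.zero_le _) h40
    rw [List.take_zero, List.append_nil] at this
    rw [ht, this, Nat.mod_mod_of_dvd n hdvd]
  have hcong : (PySem.List.enumerate answers 0).foldl
      (fun (s : Int) p => if PySem.List.pyGet?
          (PySem.List.pyRepeat base (PySem.Int.floordiv (answers.length : Int) (base.length : Int)) ++
           PySem.List.slice base none (some (PySem.Int.mod (answers.length : Int) (base.length : Int)))) p.1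
          = some p.2 then s + 1 else s) 0
      = (PySem.List.enumerate answers 0).foldl
        (fun (s : Int) p => if p.2 = PySem.List.pyGetD t (PySem.Int.mod p.1 40) 0 then s + 1 else s) 0 := by
    apply PySem.List.foldl_congr_mem
    intro acc p hp
    obtain ⟨n, hn, rfl⟩ := (PySem.List.mem_enumerate_iff _ _ _).mp hp
    simp only [zero_add]
    have hmodlt : n % base.length < base.length := Nat.mod_lt _ hL
    have hbound : n < (answers.length / base.length) * base.length + answers.length % base.length := by
      have := Nat.div_add_mod answers.length base.length
      rw [Nat.mul_comm]
      omega
    have hA : PySem.List.pyGet?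
        (PySem.List.pyRepeat base (PySem.Int.floordiv (answers.length : Int) (base.length : Int)) ++
         PySem.List.slice base none (some (PySem.Int.mod (answers.length : Int) (base.length : Int)))) ((n : Nat) : Int)
        = some base[n % base.length] := by
      rw [hrep, PySem.List.pyGet?_natCast,
        repGet base (answers.length / base.length) (answers.length % base.length) n (Nat.mod_lt _ hL).le hbound]
      exact List.getElem?_eq_getElem hmodlt
    have hB : PySem.List.pyGetD t (PySem.Int.mod ((n : Nat) : Int) 40) 0 = base[n % base.length] := by
      rw [show (40 : Int) = ((40 : Nat) : Int) from rfl, PySem.Int.mod_natCast,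
        PySem.List.pyGetD_natCast, List.getD_eq_getElem t 0 (show n % 40 < t.length by omega)]
      have hx := htidx n hmodlt
      rw [List.getElem?_eq_getElem (show n % 40 < t.length by omega),
        List.getElem?_eq_getElem hmodlt] at hx
      exact Option.some.inj hx
    rw [hA, hB]
    by_cases h : answers[n] = base[n % base.length]
    · rw [if_pos (by rw [h]), if_pos h]
    · rw [if_neg (fun hc => h (Option.some.inj hc).symm), if_neg h]
  rw [hcong, hcnt]
  rw [foldl_count (fun p : Int × Int => p.2 = PySem.List.pyGetD t (PySem.Int.mod p.1 40) 0)]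
  rw [show PySem.List.pyRange 0 40 1 = List.map (fun k : Nat => (k : Int)) (List.range 40) from by decide]
  rw [List.map_map, zero_add]
  rw [← sum_classes (PySem.List.enumerate answers 0) (fun r => PySem.List.pyGetD t r 0)
    (by
      intro p hp
      obtain ⟨n, hn, rfl⟩ := (PySem.List.mem_enumerate_iff _ _ _).mp hp
      simp)]
  apply congrArg List.sum
  apply List.map_congr_left
  intro k _
  simp only [Function.comp_apply]
  rw [PySem.Dict.getD_counter, List.count_eq_countP, List.countP_map]
  rfl


lemma score1 (answers : List Int) :
    (PySem.List.enumerate answers 0).foldl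
      (fun (s : Int) p => if PySem.List.pyGet?
          (PySem.List.pyRepeat [1, 2, 3, 4, 5] (PySem.Int.floordiv (answers.length : Int) 5) ++
           PySem.List.slice [1, 2, 3, 4, 5] none (some (PySem.Int.mod (answers.length : Int) 5))) p.1
          = some p.2 then s + 1 else s) 0
    = ((PySem.List.pyRange 0 40 1).map (fun r =>
        ((PySem.List.enumerate answers 0).foldl
            (fun d p =>
              d.insert (PySem.Int.mod p.1 40, p.2) (d.getD (PySem.Int.mod p.1 40, p.2) 0 + 1))
            PySem.Dict.empty).getD (r, PySem.List.pyGetD (PySem.List.pyRepeat [1, 2, 3, 4, 5] 8) r 0) 0)).sum := by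
  have h := pattern_score [1, 2, 3, 4, 5] answers (PySem.List.pyRepeat [1, 2, 3, 4, 5] 8) (by simp) (by decide) (by decide)
  rw [show (([1, 2, 3, 4, 5] : List Int).length : Int) = 5 from by norm_num] at h
  exact h

lemma score2 (answers : List Int) :
    (PySem.List.enumerate answers 0).foldl
      (fun (s : Int) p => if PySem.List.pyGet?
          (PySem.List.pyRepeat [2, 1, 2, 3, 2, 4, 2, 5] (PySem.Int.floordiv (answers.length : Int) 8) ++
           PySem.List.slice [2, 1, 2, 3, 2, 4, 2, 5] none (some (PySem.Int.mod (answers.length : Int) 8))) p.1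
          = some p.2 then s + 1 else s) 0
    = ((PySem.List.pyRange 0 40 1).map (fun r =>
        ((PySem.List.enumerate answers 0).foldl
            (fun d p =>
              d.insert (PySem.Int.mod p.1 40, p.2) (d.getD (PySem.Int.mod p.1 40, p.2) 0 + 1))
            PySem.Dict.empty).getD (r, PySem.List.pyGetD (PySem.List.pyRepeat [2, 1, 2, 3, 2, 4, 2, 5] 5) r 0) 0)).sum := by
  have h := pattern_score [2, 1, 2, 3, 2, 4, 2, 5] answers (PySem.List.pyRepeat [2, 1, 2, 3, 2, 4, 2, 5] 5) (by simp) (by decide) (by decide)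
  rw [show (([2, 1, 2, 3, 2, 4, 2, 5] : List Int).length : Int) = 8 from by norm_num] at h
  exact h

lemma score3 (answers : List Int) :
    (PySem.List.enumerate answers 0).foldl
      (fun (s : Int) p => if PySem.List.pyGet?
          (PySem.List.pyRepeat [3, 3, 1, 1, 2, 2, 4, 4, 5, 5] (PySem.Int.floordiv (answers.length : Int) 10) ++
           PySem.List.slice [3, 3, 1, 1, 2, 2, 4, 4, 5, 5] none (some (PySem.Int.mod (answers.length : Int) 10))) p.1
          = some p.2 then s + 1 else s) 0
    = ((PySem.List.pyRange 0 40 1).map (fun r =>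
        ((PySem.List.enumerate answers 0).foldl
            (fun d p =>
              d.insert (PySem.Int.mod p.1 40, p.2) (d.getD (PySem.Int.mod p.1 40, p.2) 0 + 1))
            PySem.Dict.empty).getD (r, PySem.List.pyGetD (PySem.List.pyRepeat [3, 3, 1, 1, 2, 2, 4, 4, 5, 5] 4) r 0) 0)).sum := by
  have h := pattern_score [3, 3, 1, 1, 2, 2, 4, 4, 5, 5] answers (PySem.List.pyRepeat [3, 3, 1, 1, 2, 2, 4, 4, 5, 5] 4) (by simp) (by decide) (by decide)
  rw [show (([3, 3, 1, 1, 2, 2, 4, 4, 5, 5] : List Int).length : Int) = 10 from by norm_num] at h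
  exact h

-- ===== VERDICT (by name: the statement is the Claim_ definition above) =====
theorem solution_spec : Claim_equal_solution := by
  intro answers _
  unfold Spec_solution solution solution_alt
  simp only [List.map]
  rw [foldl_triple]
  rw [score1, score2, score3]
  rfl
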